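-- pv_equiv track=rewrite | github.com/Arcimiendar/DISCOTestTask | disco/utils.py | create_truncation_from_indices
-- ===== SOURCE A (Python) =====
-- def create_truncation_from_indices(delimeters, words, indices):
--     word_accumulator = delimeters[0]
--     index_iter = iter(indices)
--     prev_index = next(index_iter)
--     word_accumulator += words[prev_index] + delimeters[prev_index + 1]
--
--     for index in index_iter:
--         if prev_index + 1 != index:
--             word_accumulator += '...' + delimeters[index]
--         word_accumulator += words[index] + delimeters[index + 1]
--         prev_index = index
--
--     return word_accumulator
-- ===== SOURCE B (Python) =====
-- def create_truncation_from_indices(delimeters, words, indices):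
--     # phase 1: split indices into maximal runs of consecutive integers
--     runs = []
--     run = [indices[0]]
--     for i in indices[1:]:
--         if run[-1] + 1 == i:
--             run.append(i)
--         else:
--             runs.append(run)
--             run = [i]
--     runs.append(run)
--     # phase 2: render the runs
--     first, *rest = runs
--     out = delimeters[0]
--     for k in first:
--         out += words[k] + delimeters[k + 1]
--     for r in rest:
--         out += '...' + delimeters[r[0]]
--         for k in r:
--             out += words[k] + delimeters[k + 1]
--     return out
-- ===== Notes on version B (the rewrite author's own statement) =====
-- stated objective: alternative
-- what changed: B replaces A's single accumulator-and-prev-index pass with a two-phase group-then-render algorithm: it first splits the indices into maximal runs of consecutive integers, then renders the first run after delimeters[0] and each later run prefixed by '...' plus the delimiter at its start.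
import Mathlib
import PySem

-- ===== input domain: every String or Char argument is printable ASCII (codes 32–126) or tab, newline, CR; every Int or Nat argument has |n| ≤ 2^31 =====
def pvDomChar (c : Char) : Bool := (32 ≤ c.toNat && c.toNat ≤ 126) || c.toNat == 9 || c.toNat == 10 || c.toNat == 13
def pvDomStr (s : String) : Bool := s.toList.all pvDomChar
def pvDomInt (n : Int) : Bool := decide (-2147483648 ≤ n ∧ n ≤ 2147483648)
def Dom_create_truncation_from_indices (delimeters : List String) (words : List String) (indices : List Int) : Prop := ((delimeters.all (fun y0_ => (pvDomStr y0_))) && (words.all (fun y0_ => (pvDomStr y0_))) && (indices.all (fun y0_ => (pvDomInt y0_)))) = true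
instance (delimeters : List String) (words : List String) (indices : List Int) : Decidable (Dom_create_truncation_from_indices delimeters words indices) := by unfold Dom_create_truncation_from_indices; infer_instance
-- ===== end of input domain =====

-- B builds the output from the maximal consecutive runs of the indices (group-then-render,
-- two phases) instead of A's single accumulator pass; objective: alternative decomposition.

-- total Python list access xs[i]; Pre_ guarantees every access is in range
def pvGet (xs : List String) (i : Int) : String := PySem.List.pyGetD xs i ""

-- ===== PORT A =====
-- the 'for index in index_iter' loop of A, state = (accumulator, prev_index)
def ctfiA_loop (d w : List String) (acc : String) (prev : Int) : List Int → String
  | [] => acc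
  | i :: rest =>
    let acc := if prev + 1 ≠ i then acc ++ ("..." ++ pvGet d i) else acc
    ctfiA_loop d w (acc ++ (pvGet w i ++ pvGet d (i + 1))) i rest

def create_truncation_from_indices (delimeters : List String) (words : List String) (indices : List Int) : String :=
  match indices with
  | [] => ""   -- Python raises StopIteration here; excluded by Pre_
  | i0 :: rest =>
    ctfiA_loop delimeters words
      (pvGet delimeters 0 ++ (pvGet words i0 ++ pvGet delimeters (i0 + 1))) i0 rest

-- ===== PORT B =====
-- grouping step: extend the current run or start a new one (state = (runs, run))
def ctfiB_step (st : List (List Int) × List Int) (i : Int) : List (List Int) × List Int :=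
  if st.2.getLastD 0 + 1 = i then (st.1, st.2 ++ [i]) else (st.1 ++ [st.2], [i])

-- 'out += words[k] + delimeters[k+1]'
def ctfiB_piece (d w : List String) (acc : String) (k : Int) : String :=
  acc ++ (pvGet w k ++ pvGet d (k + 1))

def create_truncation_from_indices_alt (delimeters : List String) (words : List String) (indices : List Int) : String :=
  match indices with
  | [] => ""   -- Python B raises IndexError here; excluded by Pre_
  | i0 :: tl =>
    let st := tl.foldl ctfiB_step ([], [i0])
    match st.1 ++ [st.2] with
    | [] => ""   -- unreachable
    | first :: rest =>
      let out := pvGet delimeters 0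
      let out := first.foldl (ctfiB_piece delimeters words) out
      rest.foldl
        (fun acc r =>
          r.foldl (ctfiB_piece delimeters words)
            (acc ++ ("..." ++ pvGet delimeters (r.headD 0)))) out

-- ===== PRECONDITION & SPEC =====
-- Pre_: exactly the inputs where Python A returns normally — indices nonempty (else
-- StopIteration), delimeters[0], every words[i] / delimeters[i+1], and delimeters[i]
-- at each gap (prev+1 ≠ i) in range (else IndexError).
def Pre_create_truncation_from_indices (delimeters : List String) (words : List String) (indices : List Int) : Prop :=
  indices ≠ [] ∧ delimeters ≠ [] ∧
  (∀ i ∈ indices, PySem.Raise.InRange words.length i ∧ PySem.Raise.InRange delimeters.length (i + 1)) ∧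
  (∀ p ∈ indices.zip indices.tail, p.1 + 1 ≠ p.2 → PySem.Raise.InRange delimeters.length p.2)

instance (delimeters : List String) (words : List String) (indices : List Int) : Decidable (Pre_create_truncation_from_indices delimeters words indices) := by unfold Pre_create_truncation_from_indices; infer_instance

def pvWitness_create_truncation_from_indices : List String × List String × List Int :=
  (["<", "-", ";", ">"], ["foo", "bar", "baz"], [0, 2])

def Spec_create_truncation_from_indices (delimeters : List String) (words : List String) (indices : List Int) (out : String) : Prop := out = create_truncation_from_indices_alt delimeters words indices
instance (delimeters : List String) (words : List String) (indices : List Int) (out : String) : Decidable (Spec_create_truncation_from_indices delimeters words indices out) := by unfold Spec_create_truncation_from_indices; infer_instance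

-- ===== CLAIM (what is proved, stated in full; the proofs are below) =====
def Claim_equal_create_truncation_from_indices : Prop := ∀ (delimeters : List String) (words : List String) (indices : List Int), Dom_create_truncation_from_indices delimeters words indices → Pre_create_truncation_from_indices delimeters words indices → Spec_create_truncation_from_indices delimeters words indices (create_truncation_from_indices delimeters words indices)

-- ===== LEMMAS AND PROOFS =====

-- pure (append-free) forms used to relate the two ports
def aPure (d w : List String) (prev : Int) : List Int → String
  | [] => ""
  | i :: rest =>
    (if prev + 1 ≠ i then "..." ++ pvGet d i else "") ++
      ((pvGet w i ++ pvGet d (i + 1)) ++ aPure d w i rest)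

def prRun (d w : List String) : List Int → String
  | [] => ""
  | k :: r => (pvGet w k ++ pvGet d (k + 1)) ++ prRun d w r

def concatR (d w : List String) : List (List Int) → String
  | [] => ""
  | r :: rs => (("..." ++ pvGet d (r.headD 0)) ++ prRun d w r) ++ concatR d w rs

def renderAll (d w : List String) : List (List Int) → String
  | [] => ""
  | r :: rs => prRun d w r ++ concatR d w rs

theorem aloop_eq_aPure (d w : List String) (rest : List Int) :
    ∀ acc prev, ctfiA_loop d w acc prev rest = acc ++ aPure d w prev rest := by
  induction rest with
  | nil => intro acc prev; simp [ctfiA_loop, aPure, String.append_empty]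
  | cons i rest ih =>
    intro acc prev
    simp only [ctfiA_loop, aPure]
    by_cases h : prev + 1 ≠ i <;>
      simp [h, ih, String.append_assoc]

theorem foldl_piece (d w : List String) (r : List Int) :
    ∀ acc, r.foldl (ctfiB_piece d w) acc = acc ++ prRun d w r := by
  induction r with
  | nil => intro acc; simp [prRun, String.append_empty]
  | cons k r ih => intro acc; simp [prRun, ctfiB_piece, ih, String.append_assoc]

theorem foldl_runs (d w : List String) (rs : List (List Int)) :
    ∀ acc, rs.foldl
        (fun acc r =>
          r.foldl (ctfiB_piece d w)
            (acc ++ ("..." ++ pvGet d (r.headD 0)))) acc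
      = acc ++ concatR d w rs := by
  induction rs with
  | nil => intro acc; simp [concatR, String.append_empty]
  | cons r rs ih =>
    intro acc
    rw [List.foldl_cons]
    rw [foldl_piece d w r (acc ++ ("..." ++ pvGet d (r.headD 0)))]
    rw [ih]
    simp [concatR, String.append_assoc]

theorem prRun_snoc (d w : List String) (r : List Int) (i : Int) :
    prRun d w (r ++ [i]) = prRun d w r ++ (pvGet w i ++ pvGet d (i + 1)) := by
  induction r with
  | nil => simp [prRun, String.append_empty]
  | cons k r ih => simp [prRun, ih, String.append_assoc]

theorem concatR_snoc_ext (d w : List String) (X : List (List Int)) (r : List Int) (i : Int)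
    (hr : r ≠ []) :
    concatR d w (X ++ [r ++ [i]]) = concatR d w (X ++ [r]) ++ (pvGet w i ++ pvGet d (i + 1)) := by
  have hh : (r ++ [i]).headD 0 = r.headD 0 := by
    cases r with
    | nil => exact absurd rfl hr
    | cons k r' => simp
  induction X with
  | nil =>
    simp only [List.nil_append, concatR]
    rw [hh, prRun_snoc]
    simp [String.append_assoc, String.append_empty]
  | cons x X ih => simp [concatR, ih, String.append_assoc]

theorem renderAll_snoc_ext (d w : List String) (R : List (List Int)) (r : List Int) (i : Int)
    (hr : r ≠ []) :
    renderAll d w (R ++ [r ++ [i]]) = renderAll d w (R ++ [r]) ++ (pvGet w i ++ pvGet d (i + 1)) := by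
  cases R with
  | nil =>
    simp only [List.nil_append, renderAll]
    rw [prRun_snoc]
    simp [concatR, String.append_assoc, String.append_empty]
  | cons x X => simp [renderAll, concatR_snoc_ext d w X r i hr, String.append_assoc]

theorem concatR_snoc_new (d w : List String) (X : List (List Int)) (i : Int) :
    concatR d w (X ++ [[i]]) = concatR d w X ++ (("..." ++ pvGet d i) ++ prRun d w [i]) := by
  induction X with
  | nil => simp [concatR, String.append_empty]
  | cons x X ih => simp [concatR, ih, String.append_assoc]

theorem renderAll_snoc_new (d w : List String) (S : List (List Int)) (i : Int) (hS : S ≠ []) :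
    renderAll d w (S ++ [[i]])
      = renderAll d w S ++ (("..." ++ pvGet d i) ++ prRun d w [i]) := by
  cases S with
  | nil => exact absurd rfl hS
  | cons x X => simp [renderAll, concatR_snoc_new, String.append_assoc]

theorem group_invariant (d w : List String) (tl : List Int) :
    ∀ (R : List (List Int)) (r : List Int), r ≠ [] →
      renderAll d w ((tl.foldl ctfiB_step (R, r)).1 ++ [(tl.foldl ctfiB_step (R, r)).2])
        = renderAll d w (R ++ [r]) ++ aPure d w (r.getLastD 0) tl := by
  induction tl with
  | nil => intro R r _; simp [aPure, String.append_empty]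
  | cons i tl ih =>
    intro R r hr
    simp only [List.foldl_cons, ctfiB_step]
    by_cases h : r.getLastD 0 + 1 = i
    · have hne : r ++ [i] ≠ [] := by simp
      have hlast : (r ++ [i]).getLastD 0 = i := by simp
      simp only [h, if_pos]
      rw [ih R (r ++ [i]) hne, hlast, renderAll_snoc_ext d w R r i hr]
      have h' : ¬ r.getLastD 0 + 1 ≠ i := by exact fun hc => hc h
      simp only [aPure, h', ite_false, String.append_assoc]
      simp [String.append_assoc]
    · have hlast : ([i] : List Int).getLastD 0 = i := by simp
      simp only [h, ite_false]
      rw [ih (R ++ [r]) [i] (by simp), hlast,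
          renderAll_snoc_new d w (R ++ [r]) i (by simp)]
      have h2 : ¬ (r.getLast?.getD 0 + 1 = i) := by
        simpa [List.getLastD_eq_getLast?] using h
      simp only [aPure, h, prRun, String.append_assoc, String.append_empty]
      simp [h2, String.append_assoc, String.append_empty]

-- ===== VERDICT (by name: the statement is the Claim_ definition above) =====
theorem create_truncation_from_indices_spec : Claim_equal_create_truncation_from_indices := by
  intro d w ix _ hpre
  unfold Spec_create_truncation_from_indices
  obtain ⟨hne, -, -, -⟩ := hpre
  cases ix with
  | nil => exact absurd rfl hne
  | cons i0 tl =>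
    simp only [create_truncation_from_indices, create_truncation_from_indices_alt]
    obtain ⟨first, rest, hRr⟩ :=
      List.exists_cons_of_ne_nil
        (show (tl.foldl ctfiB_step ([], [i0])).1 ++ [(tl.foldl ctfiB_step ([], [i0])).2] ≠ []
          from by simp)
    have hinv := group_invariant d w tl [] [i0] (by simp)
    rw [hRr] at hinv
    rw [hRr]
    rw [aloop_eq_aPure]
    dsimp only
    rw [foldl_piece d w first (pvGet d 0)]
    rw [foldl_runs]
    have h2 : prRun d w first ++ concatR d w rest
        = (pvGet w i0 ++ pvGet d (i0 + 1)) ++ aPure d w i0 tl := by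
      have := hinv
      simpa [renderAll, prRun, concatR, String.append_empty, String.append_assoc] using this
    have h3 : pvGet d 0 ++ prRun d w first ++ concatR d w rest
        = pvGet d 0 ++ (prRun d w first ++ concatR d w rest) := String.append_assoc
    rw [h3, h2]
    simp [String.append_assoc]
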